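-- pv_equiv track=rewrite | github.com/Angela-OH/Algorithm | 프로그래머스/Lv.2/60057.py | check
-- ===== SOURCE A (Python) =====
-- def check(s, n):
--     new_s = ''
--     index, count = 0, 1
--     while index < len(s):
--         next_index = index + n
--         if s[index: next_index] == s[next_index: next_index + n]:
--             count += 1
--         else:
--             if count > 1:
--                 new_s += str(count)
--                 count = 1
--             new_s += s[index: next_index]
--         index = next_index
--     return len(new_s)
-- ===== SOURCE B (Python) =====
-- def check(s, n):
--     # Two-pass: build the chunk list, then sum lengths over runs of equal chunks.
--     chunks = []
--     i = 0
--     while i < len(s):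
--         chunks.append(s[i:i + n])
--         i += n
--     total = 0
--     j = 0
--     while j < len(chunks):
--         k = j + 1
--         while k < len(chunks) and chunks[k] == chunks[j]:
--             k += 1
--         run = k - j
--         total += len(chunks[j])
--         if run > 1:
--             total += len(str(run))
--         j = k
--     return total
-- ===== Notes on version B (the rewrite author's own statement) =====
-- stated objective: alternative
-- what changed: B first materialises the list of n-char chunks, then sums lengths over maximal runs of equal chunks (counting integers, never building the compressed string), instead of A's single pass that compares each chunk with the next slice while concatenating a result string.
import Mathlib
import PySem

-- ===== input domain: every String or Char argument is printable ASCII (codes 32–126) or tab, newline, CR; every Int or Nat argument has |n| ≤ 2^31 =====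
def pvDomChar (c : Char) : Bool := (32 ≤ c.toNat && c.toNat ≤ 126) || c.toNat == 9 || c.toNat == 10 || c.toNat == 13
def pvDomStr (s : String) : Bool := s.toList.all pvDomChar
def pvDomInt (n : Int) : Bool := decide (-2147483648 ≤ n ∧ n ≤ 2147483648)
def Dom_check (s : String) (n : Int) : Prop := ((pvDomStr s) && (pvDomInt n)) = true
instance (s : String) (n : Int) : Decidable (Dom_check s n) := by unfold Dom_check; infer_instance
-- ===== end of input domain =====

-- B replaces A's one-pass compare-with-next-slice string building by a two-pass
-- chunk-list / run-length summation (alternative decomposition; same cost).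

-- ===== PORT A =====
-- fuel = remaining loop entries; s.length + 1 suffices whenever the Python loop terminates (n ≥ 1 or s = "")
def checkLoop (l : List Char) (n : Int) : Int → Int → List Char → Nat → Int
  | _, _, acc, 0 => (acc.length : Int)
  | index, count, acc, fuel + 1 =>
    if index < (l.length : Int) then
      if PySem.List.slice l (some index) (some (index + n))
          = PySem.List.slice l (some (index + n)) (some (index + n + n)) then
        checkLoop l n (index + n) (count + 1) acc fuel
      else
        checkLoop l n (index + n) 1
          (acc ++ (if count > 1 then (PySem.Int.toStr count).toList else [])
               ++ PySem.List.slice l (some index) (some (index + n))) fuel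
    else (acc.length : Int)

def check (s : String) (n : Int) : Int :=
  checkLoop s.toList n 0 1 [] (s.toList.length + 1)

-- ===== PORT B =====
-- first pass of Source B: the chunk list (same fuel convention as A's loop)
def chunksLoop (l : List Char) (n : Int) : Int → Nat → List (List Char)
  | _, 0 => []
  | i, fuel + 1 =>
    if i < (l.length : Int) then
      PySem.List.slice l (some i) (some (i + n)) :: chunksLoop l n (i + n) fuel
    else []

-- inner while of Source B: length of the leading run of chunks equal to chunks[j]
def runLen (c : List Char) : List (List Char) → Nat
  | [] => 0
  | d :: t => if d = c then runLen c t + 1 else 0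

-- outer while of Source B: sum of len(chunk) (+ len(str(run)) when run > 1) over maximal runs
def groupSum : List (List Char) → Int
  | [] => 0
  | c :: rest =>
    (c.length : Int)
    + (if ((runLen c rest : Int) + 1) > 1
        then ((PySem.Int.toStr ((runLen c rest : Int) + 1)).toList.length : Int) else 0)
    + groupSum (rest.drop (runLen c rest))
termination_by l => l.length
decreasing_by simp

def check_alt (s : String) (n : Int) : Int :=
  groupSum (chunksLoop s.toList n 0 (s.toList.length + 1))

-- ===== PRECONDITION & SPEC =====
-- Pre_ excludes exactly the inputs (s ≠ "" with n ≤ 0) on which A's while loop never terminates.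
def Pre_check (s : String) (n : Int) : Prop := s = "" ∨ 1 ≤ n
instance (s : String) (n : Int) : Decidable (Pre_check s n) := by unfold Pre_check; infer_instance
def pvWitness_check : String × Int := ("aabbaccc", 1)

def Spec_check (s : String) (n : Int) (out : Int) : Prop := out = check_alt s n
instance (s : String) (n : Int) (out : Int) : Decidable (Spec_check s n out) := by unfold Spec_check; infer_instance

-- ===== CLAIM (what is proved, stated in full; the proofs are below) =====
def Claim_equal_check : Prop := ∀ (s : String) (n : Int), Dom_check s n → Pre_check s n → Spec_check s n (check s n)

-- ===== LEMMAS AND PROOFS =====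

theorem groupSum_nil : groupSum [] = 0 := by rw [groupSum]

theorem groupSum_cons (c : List Char) (rest : List (List Char)) : groupSum (c :: rest) =
    (c.length : Int)
    + (if ((runLen c rest : Int) + 1) > 1
        then ((PySem.Int.toStr ((runLen c rest : Int) + 1)).toList.length : Int) else 0)
    + groupSum (rest.drop (runLen c rest)) := by rw [groupSum]

-- A's loop, reformulated over the chunk list (proof-level bridge between the two ports)
def aRun : List (List Char) → Int → Int
  | [], _ => 0
  | c :: rest, count =>
    if c = rest.headD [] then aRun rest (count + 1)
    else (if count > 1 then ((PySem.Int.toStr count).toList.length : Int) else 0)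
         + (c.length : Int) + aRun rest 1

theorem slice_empty_of_ge (l : List Char) (a b : Int) (h0 : 0 ≤ a) (hb : 0 ≤ b)
    (h : (l.length : Int) ≤ a) : PySem.List.slice l (some a) (some b) = [] := by
  rw [PySem.List.slice_toNat l h0 hb]
  have : l.length ≤ a.toNat := by omega
  simp [List.drop_eq_nil_of_le this]

theorem slice_ne_nil (l : List Char) {i n : Int} (h0 : 0 ≤ i) (hn : 1 ≤ n)
    (hi : i < (l.length : Int)) : PySem.List.slice l (some i) (some (i + n)) ≠ [] := by
  rw [PySem.List.slice_toNat l h0 (by omega)]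
  intro h
  have := congrArg List.length h
  simp at this
  omega

-- head of B's chunk list = A's look-ahead slice
theorem chunksLoop_head (l : List Char) (n : Int) (hn : 1 ≤ n) :
    ∀ (fuel : Nat) (i : Int), 0 ≤ i → (l.length : Int) ≤ i + fuel →
      (chunksLoop l n i fuel).headD []
        = PySem.List.slice l (some i) (some (i + n)) := by
  intro fuel i h0 hf
  cases fuel with
  | zero =>
    show ([] : List (List Char)).headD [] = _
    exact (slice_empty_of_ge l i (i + n) h0 (by omega) (by push_cast at hf; omega)).symm
  | succ f =>
    by_cases hi : i < (l.length : Int)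
    · show (if i < (l.length : Int) then _ :: _ else []).headD [] = _
      rw [if_pos hi, List.headD_cons]
    · show (if i < (l.length : Int) then _ :: chunksLoop l n (i + n) f else []).headD [] = _
      rw [if_neg hi]
      exact (slice_empty_of_ge l i (i + n) h0 (by omega) (by omega)).symm

-- bridge: A's loop equals aRun over B's chunk list
theorem checkLoop_eq_aRun (l : List Char) (n : Int) (hn : 1 ≤ n) :
    ∀ (fuel : Nat) (i count : Int) (acc : List Char), 0 ≤ i →
      (l.length : Int) ≤ i + fuel →
      checkLoop l n i count acc fuel
        = (acc.length : Int) + aRun (chunksLoop l n i fuel) count := by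
  intro fuel
  induction fuel with
  | zero => intro i count acc _ _; show (acc.length : Int) = _ + aRun [] count; rw [aRun]; ring
  | succ f ih =>
    intro i count acc h0 hf
    by_cases hi : i < (l.length : Int)
    · have hhead := chunksLoop_head l n hn f (i + n) (by omega) (by push_cast at hf ⊢; omega)
      have hch : chunksLoop l n i (f + 1)
          = PySem.List.slice l (some i) (some (i + n)) :: chunksLoop l n (i + n) f := by
        show (if i < (l.length : Int) then _ else []) = _
        rw [if_pos hi]
      by_cases heq : PySem.List.slice l (some i) (some (i + n))
          = PySem.List.slice l (some (i + n)) (some (i + n + n))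
      · have hA : checkLoop l n i count acc (f + 1)
            = checkLoop l n (i + n) (count + 1) acc f := by
          show (if i < (l.length : Int) then if _ = _ then _ else _ else _) = _
          rw [if_pos hi, if_pos heq]
        rw [hA, hch]
        have haR : aRun (PySem.List.slice l (some i) (some (i + n))
              :: chunksLoop l n (i + n) f) count
            = aRun (chunksLoop l n (i + n) f) (count + 1) := by
          rw [aRun, if_pos (by rw [hhead]; exact heq)]
        rw [haR]
        exact ih (i + n) (count + 1) acc (by omega) (by push_cast at hf ⊢; omega)
      · have hA : checkLoop l n i count acc (f + 1)
            = checkLoop l n (i + n) 1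
                (acc ++ (if count > 1 then (PySem.Int.toStr count).toList else [])
                     ++ PySem.List.slice l (some i) (some (i + n))) f := by
          show (if i < (l.length : Int) then if _ = _ then _ else _ else _) = _
          rw [if_pos hi, if_neg heq]
        rw [hA, hch]
        have haR : aRun (PySem.List.slice l (some i) (some (i + n))
              :: chunksLoop l n (i + n) f) count
            = (if count > 1 then ((PySem.Int.toStr count).toList.length : Int) else 0)
              + ((PySem.List.slice l (some i) (some (i + n))).length : Int)
              + aRun (chunksLoop l n (i + n) f) 1 := by
          rw [aRun, if_neg (by rw [hhead]; exact heq)]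
        rw [haR, ih (i + n) 1 _ (by omega) (by push_cast at hf ⊢; omega)]
        simp only [List.length_append]
        split_ifs <;> push_cast <;> simp <;> ring
    · have hA : checkLoop l n i count acc (f + 1) = (acc.length : Int) := by
        show (if i < (l.length : Int) then _ else (acc.length : Int)) = _
        rw [if_neg hi]
      have hch : chunksLoop l n i (f + 1) = [] := by
        show (if i < (l.length : Int) then _ else []) = _
        rw [if_neg hi]
      rw [hA, hch, aRun]; ring

-- every chunk is nonempty (n ≥ 1)
theorem chunksLoop_ne_nil (l : List Char) (n : Int) (hn : 1 ≤ n) :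
    ∀ (fuel : Nat) (i : Int), 0 ≤ i →
      ∀ d ∈ chunksLoop l n i fuel, d ≠ [] := by
  intro fuel
  induction fuel with
  | zero => intro i _ d hd; exact absurd hd (by show d ∉ ([] : List (List Char)); simp)
  | succ f ih =>
    intro i h0 d hd
    by_cases hi : i < (l.length : Int)
    · have hch : chunksLoop l n i (f + 1)
          = PySem.List.slice l (some i) (some (i + n)) :: chunksLoop l n (i + n) f := by
        show (if i < (l.length : Int) then _ else []) = _
        rw [if_pos hi]
      rw [hch] at hd
      rcases List.mem_cons.mp hd with hd | hd
      · subst hd; exact slice_ne_nil l h0 hn hi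
      · exact ih (i + n) (by omega) d hd
    · have hch : chunksLoop l n i (f + 1) = [] := by
        show (if i < (l.length : Int) then _ else []) = _
        rw [if_neg hi]
      rw [hch] at hd
      exact absurd hd (by simp)

-- aRun on a nonempty-chunk list equals the run-length summation
theorem aRun_eq_group (rest : List (List Char)) : ∀ (c : List Char) (count : Int),
    1 ≤ count → c ≠ [] → (∀ d ∈ rest, d ≠ []) →
    aRun (c :: rest) count
      = (if count + (runLen c rest : Int) > 1
          then ((PySem.Int.toStr (count + (runLen c rest : Int))).toList.length : Int) else 0)
        + (c.length : Int) + groupSum (rest.drop (runLen c rest)) := by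
  induction rest with
  | nil =>
    intro c count hc hne _
    rw [aRun]
    rw [show ([] : List (List Char)).headD [] = [] from rfl, if_neg hne, aRun]
    rw [show runLen c [] = 0 from rfl]
    simp only [Nat.cast_zero, add_zero, List.drop_nil, groupSum_nil]
  | cons d t ih =>
    intro c count hc hne hall
    have hd : d ≠ [] := hall d (List.mem_cons_self ..)
    have ht : ∀ e ∈ t, e ≠ [] := fun e he => hall e (List.mem_cons_of_mem _ he)
    by_cases hdc : d = c
    · subst hdc
      have h1 : aRun (d :: d :: t) count = aRun (d :: t) (count + 1) := by
        rw [aRun, if_pos (by rw [List.headD_cons])]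
      rw [h1, ih d (count + 1) (by omega) hd ht]
      rw [show runLen d (d :: t) = runLen d t + 1 by rw [runLen, if_pos rfl]]
      rw [List.drop_succ_cons]
      have h2 : count + 1 + (runLen d t : Int) = count + ((runLen d t : Nat) + 1 : Nat) := by
        push_cast; ring
      rw [h2]
    · have hcd : ¬ c = d := fun h => hdc h.symm
      have h1 : aRun (c :: d :: t) count
          = (if count > 1 then ((PySem.Int.toStr count).toList.length : Int) else 0)
            + (c.length : Int) + aRun (d :: t) 1 := by
        rw [aRun, if_neg (by rw [List.headD_cons]; exact hcd)]
      rw [h1, ih d 1 le_rfl hd ht]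
      rw [show runLen c (d :: t) = 0 by rw [runLen, if_neg hdc]]
      simp only [Nat.cast_zero, add_zero, List.drop_zero]
      rw [groupSum_cons]
      have h2 : (1 : Int) + (runLen d t : Int) = (runLen d t : Int) + 1 := by ring
      rw [h2]
      ring

-- ===== VERDICT (by name: the statement is the Claim_ definition above) =====
theorem check_spec : Claim_equal_check := by
  intro s n _ hpre
  unfold Spec_check check check_alt
  by_cases hl : s.toList = []
  · rw [hl]
    show checkLoop [] n 0 1 [] 1 = groupSum (chunksLoop [] n 0 1)
    have h1 : checkLoop [] n 0 1 [] 1 = 0 := by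
      show (if (0 : Int) < ((List.length ([] : List Char)) : Int) then _ else _) = 0
      rw [if_neg (by simp)]
      simp
    have h2 : chunksLoop [] n 0 1 = [] := by
      show (if (0 : Int) < ((List.length ([] : List Char)) : Int) then _ else []) = []
      rw [if_neg (by simp)]
    rw [h1, h2, groupSum_nil]
  · have hn : 1 ≤ n := by
      rcases hpre with h | h
      · exact absurd (by rw [h]; decide) hl
      · exact h
    have hlen : 0 < s.toList.length := List.length_pos_iff.mpr hl
    have hi0 : (0 : Int) < (s.toList.length : Int) := by exact_mod_cast hlen
    rw [checkLoop_eq_aRun s.toList n hn (s.toList.length + 1) 0 1 [] le_rfl (by push_cast; omega)]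
    simp only [List.length_nil, Nat.cast_zero, zero_add]
    have hch : chunksLoop s.toList n 0 (s.toList.length + 1)
        = PySem.List.slice s.toList (some 0) (some (0 + n))
          :: chunksLoop s.toList n (0 + n) s.toList.length := by
      show (if (0 : Int) < (s.toList.length : Int) then _ else []) = _
      rw [if_pos hi0]
    rw [hch]
    have hnonempty : ∀ d ∈ PySem.List.slice s.toList (some 0) (some (0 + n))
        :: chunksLoop s.toList n (0 + n) s.toList.length, d ≠ [] := by
      rw [← hch]
      exact chunksLoop_ne_nil s.toList n hn (s.toList.length + 1) 0 le_rfl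
    rw [aRun_eq_group _ _ 1 le_rfl
      (hnonempty _ (List.mem_cons_self ..))
      (fun d hd => hnonempty d (List.mem_cons_of_mem _ hd))]
    rw [groupSum_cons]
    have h1 : (1 : Int) + (runLen (PySem.List.slice s.toList (some 0) (some (0 + n)))
        (chunksLoop s.toList n (0 + n) s.toList.length) : Int)
        = (runLen (PySem.List.slice s.toList (some 0) (some (0 + n)))
            (chunksLoop s.toList n (0 + n) s.toList.length) : Int) + 1 := by ring
    rw [h1]
    ring
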